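-- pv_equiv track=rewrite | github.com/franciscod/aoc2024 | 2/solve2.py | is_bad
-- ===== SOURCE A (Python) =====
-- def is_bad(ls):
--     dif = [abs(a-b) for a, b in zip(ls, ls[1:])]
--     inc = [a > b for a, b in zip(ls, ls[1:])]
--     dec = [a < b for a, b in zip(ls, ls[1:])]
--     bad = False
--     if not all(inc) and not all(dec):
--         bad = True
--     for d in set(dif):
--         if d not in set((1, 2, 3)):
--             bad = True
--     return bad
-- ===== SOURCE B (Python) =====
-- def is_bad(ls):
--     difs = {a - b for a, b in zip(ls, ls[1:])}
--     return not (difs <= {1, 2, 3} or difs <= {-1, -2, -3})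
-- ===== Notes on version B (the rewrite author's own statement) =====
-- stated objective: faster
-- what changed: B drops A's monotonicity bookkeeping entirely: it builds one set of SIGNED adjacent differences and declares the report safe iff that set is a subset of {1,2,3} or of {-1,-2,-3} (direction is read off the sign of the gaps), replacing A's three comprehensions, two all() scans and a membership loop by one set build and two subset tests.
import Mathlib
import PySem

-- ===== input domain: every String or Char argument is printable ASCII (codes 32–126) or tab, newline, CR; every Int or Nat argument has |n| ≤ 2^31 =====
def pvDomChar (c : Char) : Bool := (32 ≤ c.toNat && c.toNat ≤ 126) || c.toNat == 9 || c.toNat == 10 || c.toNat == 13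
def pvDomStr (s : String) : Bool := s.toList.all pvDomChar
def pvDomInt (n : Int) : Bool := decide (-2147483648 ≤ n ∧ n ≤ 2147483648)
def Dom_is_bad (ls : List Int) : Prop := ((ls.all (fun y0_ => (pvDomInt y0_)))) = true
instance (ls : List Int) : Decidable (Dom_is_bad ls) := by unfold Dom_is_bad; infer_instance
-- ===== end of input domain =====

-- B replaces A's monotonicity flags and |diff| checks by one set of SIGNED adjacent
-- differences and two subset tests ({1,2,3} / {-1,-2,-3}); the direction is implied by signs (measurably faster, one pass, no boolean lists).

-- ===== PORT A =====
-- ls[1:] is ported as ls.drop 1 (exact: slice with nonnegative start).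
def is_bad (ls : List Int) : Bool :=
  let pairs := ls.zip (ls.drop 1)
  let dif := pairs.map (fun p => |p.1 - p.2|)
  let inc := pairs.map (fun p => decide (p.1 > p.2))
  let dec := pairs.map (fun p => decide (p.1 < p.2))
  let bad := if !inc.all id && !dec.all id then true else false
  -- 'for d in set(dif)': the loop only or-accumulates, so the result is set-order independent
  (PySem.Set.ofList dif).foldl
    (fun bad d => if !(PySem.Set.ofList [(1 : Int), 2, 3]).contains d then true else bad) bad

-- ===== PORT B =====
def is_bad_alt (ls : List Int) : Bool :=
  let difs : PySem.Set Int :=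
    PySem.Set.ofList ((ls.zip (ls.drop 1)).map (fun p => p.1 - p.2))
  !(PySem.Set.issubset difs (PySem.Set.ofList [(1 : Int), 2, 3])
    || PySem.Set.issubset difs (PySem.Set.ofList [(-1 : Int), -2, -3]))

-- ===== PRECONDITION & SPEC =====
def Spec_is_bad (ls : List Int) (out : Bool) : Prop := out = is_bad_alt ls
instance (ls : List Int) (out : Bool) : Decidable (Spec_is_bad ls out) := by unfold Spec_is_bad; infer_instance

-- ===== CLAIM =====
def Claim_equal_is_bad : Prop := ∀ (ls : List Int), Dom_is_bad ls → Spec_is_bad ls (is_bad ls)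

-- ===== LEMMAS AND PROOFS =====

-- A's set loop only or-accumulates: it equals the initial flag or'ed with an 'any'.
theorem foldl_or_any (xs : List Int) (b : Bool) (S : PySem.Set Int) :
    xs.foldl (fun bad d => if !S.contains d then true else bad) b
      = (b || xs.any (fun d => !S.contains d)) := by
  induction xs generalizing b with
  | nil => simp
  | cons x xs ih =>
      simp only [List.foldl_cons, List.any_cons, ih]
      cases S.contains x <;> cases b <;> simp

-- 'any' over set(xs) is 'any' over xs.
theorem any_ofList (xs : List Int) (p : Int → Bool) :
    (PySem.Set.ofList xs).any p = xs.any p := by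
  apply Bool.eq_iff_iff.mpr
  simp [List.any_eq_true, PySem.Set.mem_ofList]

-- B's subset test over set(xs) is an 'all' over xs.
theorem issubset_ofList (xs : List Int) (t : List Int) :
    PySem.Set.issubset (PySem.Set.ofList xs) t = xs.all (fun x => decide (x ∈ t)) := by
  apply Bool.eq_iff_iff.mpr
  simp [PySem.Set.issubset_iff, PySem.Set.mem_ofList, List.all_eq_true]

-- 'all' of a conjunction splits.
theorem all_and {α : Type} (xs : List α) (f g : α → Bool) :
    xs.all (fun x => f x && g x) = (xs.all f && xs.all g) := by
  induction xs with
  | nil => simp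
  | cons x xs ih =>
      simp only [List.all_cons, ih]
      cases f x <;> cases g x <;> simp

-- 'any (not ∘ q)' is 'not all q'.
theorem any_not {α : Type} (xs : List α) (q : α → Bool) :
    (xs.any fun x => !q x) = !xs.all q := by
  induction xs with
  | nil => simp
  | cons x xs ih => simp [ih, Bool.not_and]

-- Pointwise: signed gap in {1,2,3} iff (a > b and |a − b| in {1,2,3}).
theorem pt_pos (p : Int × Int) :
    decide (p.1 - p.2 ∈ [(1 : Int), 2, 3])
      = (decide (p.1 > p.2) && decide (|p.1 - p.2| ∈ [(1 : Int), 2, 3])) := by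
  apply Bool.eq_iff_iff.mpr
  simp only [List.mem_cons, List.not_mem_nil, or_false, decide_eq_true_eq, Bool.and_eq_true]
  rcases abs_cases (p.1 - p.2) with ⟨h, _⟩ | ⟨h, _⟩ <;> omega

-- Pointwise: signed gap in {-1,-2,-3} iff (a < b and |a − b| in {1,2,3}).
theorem pt_neg (p : Int × Int) :
    decide (p.1 - p.2 ∈ [(-1 : Int), -2, -3])
      = (decide (p.1 < p.2) && decide (|p.1 - p.2| ∈ [(1 : Int), 2, 3])) := by
  apply Bool.eq_iff_iff.mpr
  simp only [List.mem_cons, List.not_mem_nil, or_false, decide_eq_true_eq, Bool.and_eq_true]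
  rcases abs_cases (p.1 - p.2) with ⟨h, _⟩ | ⟨h, _⟩ <;> omega

-- Function-extensionality congruence for 'all' / 'any'.
theorem all_ext {α : Type} (xs : List α) (f g : α → Bool) (h : ∀ x, f x = g x) :
    xs.all f = xs.all g := by rw [funext h]

theorem any_ext {α : Type} (xs : List α) (f g : α → Bool) (h : ∀ x, f x = g x) :
    xs.any f = xs.any g := by rw [funext h]

-- ===== VERDICT =====
theorem is_bad_spec : Claim_equal_is_bad := by
  intro ls _
  show is_bad ls = is_bad_alt ls
  unfold is_bad is_bad_alt
  have e1 : PySem.Set.ofList [(1 : Int), 2, 3] = [(1 : Int), 2, 3] := by decide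
  have e2 : PySem.Set.ofList [(-1 : Int), -2, -3] = [(-1 : Int), -2, -3] := by decide
  simp only [foldl_or_any, any_ofList, issubset_ofList, e1, e2, List.all_map, List.any_map,
    Function.comp_def, id_eq]
  rw [all_ext _ _ _ pt_pos, all_ext _ _ _ pt_neg,
      any_ext _ (fun p : Int × Int => !(PySem.Set.contains [(1:Int),2,3] (|p.1 - p.2|)))
        (fun p : Int × Int => !(decide (|p.1 - p.2| ∈ [(1:Int),2,3])))
        (fun p => by apply Bool.eq_iff_iff.mpr; simp),
      all_and, all_and, any_not]
  generalize (ls.zip (ls.drop 1)).all (fun p => decide (p.1 > p.2)) = I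
  generalize (ls.zip (ls.drop 1)).all (fun p => decide (p.1 < p.2)) = D
  generalize (ls.zip (ls.drop 1)).all (fun p => decide (|p.1 - p.2| ∈ [(1:Int),2,3])) = V
  cases I <;> cases D <;> cases V <;> simp
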